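-- pv_equiv track=rewrite | github.com/yesjiyoung/OSS_NL2SQL_Shopping_Cart_Speaker | model/sql_translation/select.py | se_find_price_value
-- ===== SOURCE A (Python) =====
-- def se_find_price_value (any_list):
--     re = 'NAN'
--     re_comma = 'NAN'
--
--     for i in range(0, len(any_list)):
--         if(any_list[i] == 'less'):
--             re_comma = any_list[i+1]
--             re = re_comma.replace(',','')
--
--     if(re == 'NAN'):
--         re = 'superlative'
--
--     return re
-- ===== SOURCE B (Python) =====
-- def se_find_price_value(any_list):
--     for i in range(len(any_list) - 1, -1, -1):
--         if any_list[i] == 'less':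
--             return any_list[i + 1].replace(',', '')
--     return 'superlative'
-- ===== Notes on version B (the rewrite author's own statement) =====
-- stated objective: simpler
-- what changed: B scans backwards from the end and returns the value right after the first 'less' it meets (i.e. the last 'less'), with no running accumulator and no 'NAN' sentinel; A scans the whole list forward overwriting a result variable and uses 'NAN' as a sentinel.
-- intended difference: On lists where the element after the last 'less' equals 'NAN' once commas are removed, A's sentinel check misfires and it returns 'superlative'; B returns 'NAN', the actual comma-stripped value after the last 'less', which is the intended result. — e.g. on se_find_price_value(["less", "NAN"]): A returns "superlative", B returns "NAN"
import Mathlib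
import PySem

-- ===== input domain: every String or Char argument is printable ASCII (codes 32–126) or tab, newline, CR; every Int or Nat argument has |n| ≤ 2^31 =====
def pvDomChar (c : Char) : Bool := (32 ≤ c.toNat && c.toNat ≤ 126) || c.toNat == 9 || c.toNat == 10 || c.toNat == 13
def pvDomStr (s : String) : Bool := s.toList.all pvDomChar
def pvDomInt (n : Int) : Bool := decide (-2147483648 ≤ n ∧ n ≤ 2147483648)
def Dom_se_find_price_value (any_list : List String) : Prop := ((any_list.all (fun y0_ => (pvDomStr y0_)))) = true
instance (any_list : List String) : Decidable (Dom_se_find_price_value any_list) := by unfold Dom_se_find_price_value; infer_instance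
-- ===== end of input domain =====

-- ===== PORT A =====
-- A: forward scan over all indices, overwriting a running result; 'NAN' sentinel turned
-- into 'superlative' at the end.  B: backward scan with early return, no sentinel.
def se_find_price_value (any_list : List String) : String :=
  let st := (PySem.List.pyRange 0 (any_list.length : Int) 1).foldl
    (fun (s : String × String) i =>
      if (PySem.List.pyGet? any_list i).getD "" == "less" then
        let re_comma := (PySem.List.pyGet? any_list (i + 1)).getD ""
        (PySem.Str.replace re_comma "," "", re_comma)
      else s) ("NAN", "NAN")
  if st.1 == "NAN" then "superlative" else st.1

-- ===== PORT B =====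
-- backward scan: index i+1-1 = i is inspected, then recurse on i
def seAltGo (any_list : List String) : Nat → String
  | 0 => "superlative"
  | i + 1 =>
    if (PySem.List.pyGet? any_list (i : Int)).getD "" == "less" then
      PySem.Str.replace ((PySem.List.pyGet? any_list ((i : Int) + 1)).getD "") "," ""
    else seAltGo any_list i

def se_find_price_value_alt (any_list : List String) : String :=
  seAltGo any_list any_list.length

-- ===== PRECONDITION & SPEC =====
-- Pre_ excludes exactly the inputs on which Python A raises IndexError: a list whose
-- last element is 'less' (the loop then reads any_list[len]); Python B raises there too.
def Pre_se_find_price_value (any_list : List String) : Prop :=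
  any_list.getLast? ≠ some "less"
instance (any_list : List String) : Decidable (Pre_se_find_price_value any_list) := by
  unfold Pre_se_find_price_value; infer_instance
def pvWitness_se_find_price_value : List String := ["less", "1,000", "more"]

-- On lists where the element after the last 'less' equals 'NAN' once commas are removed,
-- A's sentinel check misfires and it returns 'superlative'; B returns 'NAN', the actual
-- comma-stripped value after the last 'less', which is the intended result.
def D_se_find_price_value (any_list : List String) : Prop :=
  ∃ i ∈ List.range any_list.length,
    any_list.getD i "" = "less" ∧ i + 1 < any_list.length ∧
    (∀ j ∈ List.range any_list.length, i < j → any_list.getD j "" ≠ "less") ∧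
    PySem.Str.replace (any_list.getD (i + 1) "") "," "" = "NAN"
instance (any_list : List String) : Decidable (D_se_find_price_value any_list) := by
  unfold D_se_find_price_value; infer_instance

def Spec_se_find_price_value (any_list : List String) (out : String) : Prop :=
  ¬ D_se_find_price_value any_list → out = se_find_price_value_alt any_list
instance (any_list : List String) (out : String) : Decidable (Spec_se_find_price_value any_list out) := by
  unfold Spec_se_find_price_value; infer_instance

def pvDiffWitness_se_find_price_value : List String := ["less", "NAN"]
def pvDiffWitnessOut_se_find_price_value : String × String := ("superlative", "NAN")

-- ===== CLAIM (what is proved, stated in full; the proofs are below) =====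
def Claim_unchanged_se_find_price_value : Prop := ∀ (any_list : List String), Dom_se_find_price_value any_list → Pre_se_find_price_value any_list → Spec_se_find_price_value any_list (se_find_price_value any_list)
def Claim_changed_se_find_price_value : Prop := Dom_se_find_price_value (pvDiffWitness_se_find_price_value) ∧ Pre_se_find_price_value (pvDiffWitness_se_find_price_value) ∧ D_se_find_price_value (pvDiffWitness_se_find_price_value) ∧ se_find_price_value (pvDiffWitness_se_find_price_value) = pvDiffWitnessOut_se_find_price_value.1 ∧ se_find_price_value_alt (pvDiffWitness_se_find_price_value) = pvDiffWitnessOut_se_find_price_value.2 ∧ pvDiffWitnessOut_se_find_price_value.1 ≠ pvDiffWitnessOut_se_find_price_value.2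
def Claim_exact_se_find_price_value : Prop := ∀ (any_list : List String), Dom_se_find_price_value any_list → Pre_se_find_price_value any_list → D_se_find_price_value any_list → se_find_price_value any_list ≠ se_find_price_value_alt any_list

-- ===== LEMMAS AND PROOFS =====

-- abbreviations used only in the proofs
def seStep (any_list : List String) (s : String × String) (i : Int) : String × String :=
  if (PySem.List.pyGet? any_list i).getD "" == "less" then
    let re_comma := (PySem.List.pyGet? any_list (i + 1)).getD ""
    (PySem.Str.replace re_comma "," "", re_comma)
  else s

def seF (any_list : List String) (k : Nat) : String × String :=
  (PySem.List.pyRange 0 (k : Int) 1).foldl (seStep any_list) ("NAN", "NAN")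

def seLook (any_list : List String) (j : Nat) : String :=
  (PySem.List.pyGet? any_list (j : Int)).getD ""

theorem seF_succ (a : List String) (k : Nat) :
    seF a (k + 1) = seStep a (seF a k) (k : Int) := by
  unfold seF
  rw [show (((k + 1 : Nat)) : Int) = (k : Int) + 1 by push_cast; ring,
      PySem.List.pyRange_one_succ_right (by positivity)]
  simp [List.foldl_append]

theorem seGo_succ (a : List String) (k : Nat) :
    seAltGo a (k + 1) =
      if seLook a k == "less" then
        PySem.Str.replace ((PySem.List.pyGet? a ((k : Int) + 1)).getD "") "," ""
      else seAltGo a k := rfl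

theorem seStep_unfold (a : List String) (s : String × String) (k : Nat) :
    seStep a s (k : Int) =
      if seLook a k == "less" then
        ((PySem.Str.replace ((PySem.List.pyGet? a ((k : Int) + 1)).getD "") "," ""),
         ((PySem.List.pyGet? a ((k : Int) + 1)).getD ""))
      else s := rfl

-- core characterisation: for every k, either no 'less' in [0,k) and the fold state is the
-- initial sentinel (B's go is 'superlative'), or the fold's first component equals B's go
-- and is the comma-stripped value after the last 'less' below k.
theorem seMain (a : List String) : ∀ k : Nat,
    ((∀ j, j < k → seLook a j ≠ "less") ∧ seF a k = ("NAN", "NAN") ∧ seAltGo a k = "superlative")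
    ∨ ((seF a k).1 = seAltGo a k ∧
        ∃ i, i < k ∧ seLook a i = "less" ∧ (∀ j, i < j → j < k → seLook a j ≠ "less") ∧
          (seF a k).1 = PySem.Str.replace ((PySem.List.pyGet? a ((i : Int) + 1)).getD "") "," "") := by
  intro k
  induction k with
  | zero =>
    left
    refine ⟨fun j hj => absurd hj (by omega), ?_, rfl⟩
    unfold seF
    rw [show ((0 : Nat) : Int) = 0 by norm_num, PySem.List.pyRange_one_eq_nil (le_refl 0)]
    rfl
  | succ k ih =>
    rw [seF_succ, seGo_succ, seStep_unfold]
    by_cases h : seLook a k = "less"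
    · right
      rw [h]
      simp only [beq_self_eq_true, if_true]
      exact ⟨by simp, k, by omega, h, fun j h1 h2 => absurd h1 (by omega), by simp⟩
    · have hc : (seLook a k == "less") = false := beq_eq_false_iff_ne.mpr h
      rw [hc]
      simp only [Bool.false_eq_true, if_false]
      rcases ih with ⟨h1, h2, h3⟩ | ⟨h1, i, hi1, hi2, hi3, hi4⟩
      · left
        refine ⟨fun j hj => ?_, h2, h3⟩
        rcases Nat.lt_succ_iff_lt_or_eq.mp hj with hj' | rfl
        · exact h1 j hj'
        · exact h
      · right
        refine ⟨h1, i, by omega, hi2, fun j hj1 hj2 => ?_, hi4⟩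
        rcases Nat.lt_succ_iff_lt_or_eq.mp hj2 with hj' | rfl
        · exact hi3 j hj1 hj'
        · exact h

theorem seLook_eq_getD (a : List String) (j : Nat) (_hj : j < a.length) :
    seLook a j = a.getD j "" := by
  simp [seLook, PySem.List.pyGet?_natCast, List.getD]

theorem se_A_eq (a : List String) :
    se_find_price_value a =
      (if (seF a a.length).1 == "NAN" then "superlative" else (seF a a.length).1) := rfl

-- under Pre_, a 'less' index with no 'less' after it cannot be the final index
theorem se_last_lt (a : List String) (hpre : Pre_se_find_price_value a)
    (i : Nat) (hi1 : i < a.length) (hi2 : seLook a i = "less")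
    (_hi3 : ∀ j, i < j → j < a.length → seLook a j ≠ "less") : i + 1 < a.length := by
  by_contra hcon
  apply hpre
  have hival : a[i] = "less" := by
    have hg := seLook_eq_getD a i hi1
    rw [hi2] at hg
    simp [List.getD_eq_getElem?_getD, List.getElem?_eq_getElem hi1] at hg
    exact hg.symm
  have hie : a.length - 1 = i := by omega
  rw [List.getLast?_eq_getElem?, hie, List.getElem?_eq_getElem hi1, hival]

theorem se_shift (a : List String) (i : Nat) (hlt : i + 1 < a.length) :
    ((PySem.List.pyGet? a ((i : Int) + 1)).getD "") = a.getD (i + 1) "" := by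
  have hg := seLook_eq_getD a (i + 1) hlt
  simpa [seLook, Nat.cast_add] using hg

theorem se_unchanged (a : List String) (hpre : Pre_se_find_price_value a)
    (hnd : ¬ D_se_find_price_value a) :
    se_find_price_value a = se_find_price_value_alt a := by
  rw [se_A_eq]
  show _ = seAltGo a a.length
  rcases seMain a a.length with ⟨h1, h2, h3⟩ | ⟨h1, i, hi1, hi2, hi3, hi4⟩
  · rw [h2, h3]; decide
  · have hlt : i + 1 < a.length := se_last_lt a hpre i hi1 hi2 hi3
    have hval : (seF a a.length).1 ≠ "NAN" := by
      intro hnan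
      apply hnd
      refine ⟨i, List.mem_range.mpr hi1, ?_, hlt, ?_, ?_⟩
      · rw [← seLook_eq_getD a i hi1]; exact hi2
      · intro j hj hij
        rw [← seLook_eq_getD a j (List.mem_range.mp hj)]
        exact hi3 j hij (List.mem_range.mp hj)
      · rw [← se_shift a i hlt, ← hi4, hnan]
    simp only [beq_iff_eq, hval, if_false]
    exact h1

theorem se_exact_core (a : List String) (_hpre : Pre_se_find_price_value a)
    (hd : D_se_find_price_value a) :
    se_find_price_value a ≠ se_find_price_value_alt a := by
  rcases hd with ⟨i, hmem, hless, hlt, hlast, hrep⟩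
  have hi : i < a.length := List.mem_range.mp hmem
  have hless' : seLook a i = "less" := by rw [seLook_eq_getD a i hi]; exact hless
  have hlast' : ∀ j, i < j → j < a.length → seLook a j ≠ "less" := by
    intro j h1 h2
    rw [seLook_eq_getD a j h2]
    exact hlast j (List.mem_range.mpr h2) h1
  rcases seMain a a.length with ⟨h1, _, _⟩ | ⟨h1, i', hi1', hi2', hi3', hi4'⟩
  · exact absurd hless' (h1 i hi)
  · have hii : i' = i := by
      rcases Nat.lt_trichotomy i' i with hlt' | heq | hgt
      · exact absurd hless' (hi3' i hlt' hi)
      · exact heq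
      · exact absurd hi2' (hlast' i' hgt hi1')
    rw [hii] at hi4'
    have hF : (seF a a.length).1 = "NAN" := by
      rw [hi4', se_shift a i hlt, hrep]
    rw [se_A_eq]
    simp only [hF, beq_self_eq_true, if_true]
    show "superlative" ≠ seAltGo a a.length
    rw [← h1, hF]
    decide

-- ===== VERDICT (by name: the statement is the Claim_ definition above) =====
theorem se_find_price_value_spec : Claim_unchanged_se_find_price_value := by
  intro a _ hpre hnd
  exact se_unchanged a hpre hnd

theorem se_find_price_value_changed : Claim_changed_se_find_price_value := by
  unfold Claim_changed_se_find_price_value; decide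

theorem se_find_price_value_tight : Claim_exact_se_find_price_value := by
  intro a _ hpre hd
  exact se_exact_core a hpre hd
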